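-- pv_equiv track=rewrite | github.com/detongz/materialWebSite | handler/resourse.py | text2Html
-- ===== SOURCE A (Python) =====
-- def text2Html(content):
--     def escape(txt):
--         """将txt文本中的空格、&、<、>、（"）、（'）转化成对应的的字符实体，以方便在html上显示"""
--         txt = txt.replace('&', '&#38;')
--         txt = txt.replace(' ', '&#160;')
--         txt = txt.replace('<', '&#60;')
--         txt = txt.replace('>', '&#62;')
--         txt = txt.replace('"', '&#34;')
--         txt = txt.replace('\'', '&#39;')
--         return txt
--
--     content = escape(content)
--     lines = content.split('\n')
--     for i, line in enumerate(lines):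
--         lines[i] = '<p>' + line + '</p><br>'
--     content = ''.join(lines)
--     return content
-- ===== SOURCE B (Python) =====
-- def text2Html(content):
--     # one pass: per-character entity lookup; '\n' closes one paragraph and opens the next
--     mapping = {'&': '&#38;', ' ': '&#160;', '<': '&#60;', '>': '&#62;',
--                '"': '&#34;', "'": '&#39;', '\n': '</p><br><p>'}
--     out = ['<p>']
--     for c in content:
--         out.append(mapping.get(c, c))
--     out.append('</p><br>')
--     return ''.join(out)
-- ===== Notes on version B (the rewrite author's own statement) =====
-- stated objective: idiomatic
-- what changed: Replaced six sequential full-string replace passes followed by split/wrap/join with a single character-by-character pass using an entity-lookup table that also emits the paragraph breaks at newlines.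
import Mathlib
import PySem

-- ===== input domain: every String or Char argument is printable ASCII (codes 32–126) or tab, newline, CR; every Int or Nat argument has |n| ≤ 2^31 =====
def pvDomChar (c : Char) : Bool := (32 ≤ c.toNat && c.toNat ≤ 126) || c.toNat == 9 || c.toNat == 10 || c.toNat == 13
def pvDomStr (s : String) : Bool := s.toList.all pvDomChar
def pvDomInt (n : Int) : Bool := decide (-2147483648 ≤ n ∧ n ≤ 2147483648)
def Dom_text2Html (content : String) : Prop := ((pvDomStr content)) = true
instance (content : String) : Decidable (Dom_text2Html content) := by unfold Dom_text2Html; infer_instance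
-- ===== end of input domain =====

-- B escapes and wraps in ONE character pass with an entity-lookup table, instead of A's six
-- sequential replace passes followed by split/wrap/join (objective: idiomatic single pass).


-- ===== PORT A =====
-- six replace passes, then split on '\n', wrap each line, join.
-- split? is none only for an empty separator, which "\n" is not; .getD [] discharges the Option.
-- the nested 'def escape' of A
def escapeA (txt : String) : String :=
  let t1 := PySem.Str.replace txt "&" "&#38;"
  let t2 := PySem.Str.replace t1 " " "&#160;"
  let t3 := PySem.Str.replace t2 "<" "&#60;"
  let t4 := PySem.Str.replace t3 ">" "&#62;"
  let t5 := PySem.Str.replace t4 "\"" "&#34;"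
  PySem.Str.replace t5 "'" "&#39;"

def text2Html (content : String) : String :=
  let content1 := escapeA content
  let lines := (PySem.Str.split? content1 "\n").getD []
  let lines := lines.map (fun line => "<p>" ++ line ++ "</p><br>")
  PySem.Str.join "" lines

-- ===== PORT B =====
-- the dict literal of Source B, as an association list (lookup = first match)
def bMapping : List (Char × String) :=
  [('&', "&#38;"), (' ', "&#160;"), ('<', "&#60;"), ('>', "&#62;"),
   ('"', "&#34;"), ('\'', "&#39;"), ('\n', "</p><br><p>")]

-- single pass: start with "<p>", append mapping.get(c, c) for each char, append "</p><br>"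
def text2Html_alt (content : String) : String :=
  String.ofList
    ((content.toList.foldl
        (fun acc c => acc ++ (((bMapping.lookup c).getD (String.singleton c)).toList))
        "<p>".toList)
      ++ "</p><br>".toList)

-- ===== PRECONDITION & SPEC =====
def Spec_text2Html (content : String) (out : String) : Prop := out = text2Html_alt content
instance (content : String) (out : String) : Decidable (Spec_text2Html content out) := by unfold Spec_text2Html; infer_instance

-- ===== CLAIM (what is proved, stated in full; the proofs are below) =====
def Claim_equal_text2Html : Prop := ∀ (content : String), Dom_text2Html content → Spec_text2Html content (text2Html content)

-- ===== LEMMAS AND PROOFS =====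

-- per-character escape performed by one replace pass with a single-char pattern
def escOne (o : Char) (new : List Char) (c : Char) : List Char :=
  if c = o then new else [c]

-- the combined effect of A's six escape passes on one character
def escFull (c : Char) : List Char :=
  if c = '&' then "&#38;".toList
  else if c = ' ' then "&#160;".toList
  else if c = '<' then "&#60;".toList
  else if c = '>' then "&#62;".toList
  else if c = '"' then "&#34;".toList
  else if c = '\'' then "&#39;".toList
  else [c]

-- B's per-character table, at list level ('\n' closes and re-opens the paragraph)
def escB (c : Char) : List Char :=
  if c = '\n' then "</p><br><p>".toList else escFull c

theorem replace_go_single (o : Char) (new : List Char) :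
    ∀ (fuel : Nat) (l acc : List Char), l.length ≤ fuel →
      PySem.Chars.replace.go [o] new fuel l acc
        = acc.reverse ++ l.flatMap (escOne o new) := by
  intro fuel
  induction fuel with
  | zero =>
      intro l acc h
      have : l = [] := List.eq_nil_of_length_eq_zero (Nat.le_zero.mp h)
      subst this
      simp [PySem.Chars.replace.go]
  | succ n ih =>
      intro l acc h
      cases l with
      | nil => simp [PySem.Chars.replace.go]
      | cons c t =>
          have h' : t.length ≤ n := by simpa using h
          simp only [PySem.Chars.replace.go]
          by_cases hc : c = o
          · subst hc
            have hp : List.isPrefixOf [c] (c :: t) = true := by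
              simp [List.isPrefixOf]
            rw [if_pos hp]
            have hd : List.drop [c].length (c :: t) = t := by simp
            rw [hd, ih t (new.reverse ++ acc) h']
            simp [escOne]
          · have hp : List.isPrefixOf [o] (c :: t) = false := by
              simp [List.isPrefixOf]
              exact fun he => absurd he.symm hc
            rw [if_neg (by simp [hp])]
            rw [ih t (c :: acc) h']
            simp [escOne, hc]

theorem replace_single (o : Char) (new l : List Char) :
    PySem.Chars.replace l [o] new = l.flatMap (escOne o new) := by
  simp [PySem.Chars.replace, replace_go_single o new l.length l [] le_rfl]

-- splitting on '\n', as a pure structural recursion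
def splitNL : List Char → List (List Char)
  | [] => [[]]
  | c :: cs => if c = '\n' then [] :: splitNL cs else (splitNL cs).modifyHead (c :: ·)

theorem splitOn_go_nl :
    ∀ (fuel : Nat) (l cur : List Char) (acc : List (List Char)), l.length ≤ fuel →
      PySem.Chars.splitOn.go ['\n'] fuel l cur acc
        = acc.reverse ++ (splitNL l).modifyHead (cur.reverse ++ ·) := by
  intro fuel
  induction fuel with
  | zero =>
      intro l cur acc h
      have : l = [] := List.eq_nil_of_length_eq_zero (Nat.le_zero.mp h)
      subst this
      simp [PySem.Chars.splitOn.go, splitNL]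
  | succ n ih =>
      intro l cur acc h
      cases l with
      | nil => simp [PySem.Chars.splitOn.go, splitNL]
      | cons c t =>
          have h' : t.length ≤ n := by simpa using h
          simp only [PySem.Chars.splitOn.go]
          by_cases hc : c = '\n'
          · subst hc
            have hp : List.isPrefixOf ['\n'] ('\n' :: t) = true := by
              simp [List.isPrefixOf]
            rw [if_pos hp]
            have hd : List.drop ['\n'].length ('\n' :: t) = t := by simp
            rw [hd, ih t [] (cur.reverse :: acc) h']
            simp [splitNL]
            cases splitNL t <;> simp
          · have hp : List.isPrefixOf ['\n'] (c :: t) = false := by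
              simp [List.isPrefixOf]
              exact fun he => absurd he.symm hc
            rw [if_neg (by simp [hp])]
            rw [ih t (c :: cur) acc h']
            simp [splitNL, hc]
            cases splitNL t <;> simp

theorem splitOn_nl (l : List Char) :
    PySem.Chars.splitOn l ['\n'] = splitNL l := by
  have := splitOn_go_nl (l.length + 1) l [] [] (by omega)
  simp only [PySem.Chars.splitOn, this, List.reverse_nil, List.nil_append]
  cases splitNL l <;> simp

theorem escB_eq (c : Char) :
    (((bMapping.lookup c).getD (String.singleton c)).toList) = escB c := by
  by_cases h1 : c = '&'; · subst h1; decide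
  by_cases h2 : c = ' '; · subst h2; decide
  by_cases h3 : c = '<'; · subst h3; decide
  by_cases h4 : c = '>'; · subst h4; decide
  by_cases h5 : c = '"'; · subst h5; decide
  by_cases h6 : c = '\''; · subst h6; decide
  by_cases h7 : c = '\n'; · subst h7; decide
  have e1 : (c == '&') = false := by simp [h1]
  have e2 : (c == ' ') = false := by simp [h2]
  have e3 : (c == '<') = false := by simp [h3]
  have e4 : (c == '>') = false := by simp [h4]
  have e5 : (c == '"') = false := by simp [h5]
  have e6 : (c == '\'') = false := by simp [h6]
  have e7 : (c == '\n') = false := by simp [h7]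
  simp [bMapping, List.lookup, e1, e2, e3, e4, e5, e6, e7, escB, escFull,
    h1, h2, h3, h4, h5, h6, h7, String.singleton]

-- one character through all six of A's passes = the combined table
theorem combo (c : Char) :
    ((((((escOne '&' "&#38;".toList c).flatMap (escOne ' ' "&#160;".toList)).flatMap
        (escOne '<' "&#60;".toList)).flatMap (escOne '>' "&#62;".toList)).flatMap
        (escOne '"' "&#34;".toList)).flatMap (escOne '\'' "&#39;".toList))
      = escFull c := by
  by_cases h1 : c = '&'; · subst h1; decide
  by_cases h2 : c = ' '; · subst h2; decide
  by_cases h3 : c = '<'; · subst h3; decide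
  by_cases h4 : c = '>'; · subst h4; decide
  by_cases h5 : c = '"'; · subst h5; decide
  by_cases h6 : c = '\''; · subst h6; decide
  simp [escOne, escFull, h1, h2, h3, h4, h5, h6]

theorem escape_chain (cs : List Char) :
    ((((((cs.flatMap (escOne '&' "&#38;".toList)).flatMap (escOne ' ' "&#160;".toList)).flatMap
        (escOne '<' "&#60;".toList)).flatMap (escOne '>' "&#62;".toList)).flatMap
        (escOne '"' "&#34;".toList)).flatMap (escOne '\'' "&#39;".toList))
      = cs.flatMap escFull := by
  induction cs with
  | nil => simp
  | cons c t ih => simp only [List.flatMap_cons, List.flatMap_append, ih, combo]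

-- no escaped chunk contains a newline except the one for '\n' itself
theorem escFull_then_nl (c : Char) :
    (escFull c).flatMap (fun c => if c = '\n' then "</p><br>".toList ++ "<p>".toList else [c])
      = escB c := by
  by_cases h1 : c = '&'; · subst h1; decide
  by_cases h2 : c = ' '; · subst h2; decide
  by_cases h3 : c = '<'; · subst h3; decide
  by_cases h4 : c = '>'; · subst h4; decide
  by_cases h5 : c = '"'; · subst h5; decide
  by_cases h6 : c = '\''; · subst h6; decide
  by_cases h7 : c = '\n'; · subst h7; decide
  simp [escFull, escB, h1, h2, h3, h4, h5, h6, h7]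

-- wrap-and-flatten of the split pieces = one pass emitting the paragraph breaks
theorem wrap_flatten_aux (p q : List Char) :
    ∀ (xs a : List Char),
      (((splitNL xs).modifyHead (a ++ ·)).map (fun l => p ++ l ++ q)).flatten
        = p ++ a ++ xs.flatMap (fun c => if c = '\n' then q ++ p else [c]) ++ q := by
  intro xs
  induction xs with
  | nil => intro a; simp [splitNL]
  | cons c t ih =>
      intro a
      by_cases hc : c = '\n'
      · subst hc
        have h0 : List.modifyHead (fun x => ([] : List Char) ++ x) (splitNL t) = splitNL t := by
          cases splitNL t <;> simp
        have ht := ih []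
        rw [h0] at ht
        simp only [List.append_nil] at ht
        simp [splitNL]
        simp only [List.append_assoc] at ht
        rw [ht]
      · have h1 : (splitNL (c :: t)).modifyHead (a ++ ·)
            = (splitNL t).modifyHead ((a ++ [c]) ++ ·) := by
          simp only [splitNL, if_neg hc]
          cases splitNL t <;> simp
        rw [h1, ih (a ++ [c])]
        simp [hc]

-- joining with the empty separator is flattening
theorem join_nil_sep (parts : List (List Char)) : PySem.Chars.join [] parts = parts.flatten := by
  induction parts with
  | nil => simp [PySem.Chars.join, List.intercalate]
  | cons a t ih =>
      cases t with
      | nil => simp [PySem.Chars.join, List.intercalate]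
      | cons b t2 =>
          rw [PySem.Chars.join_cons_cons]
          rw [ih]
          simp

-- A's escape at the list level
theorem escapeA_toList (s : String) :
    (escapeA s).toList = s.toList.flatMap escFull := by
  unfold escapeA
  simp only [PySem.Str.toList_replace]
  rw [show ("&" : String).toList = ['&'] from by decide,
      show (" " : String).toList = [' '] from by decide,
      show ("<" : String).toList = ['<'] from by decide,
      show (">" : String).toList = ['>'] from by decide,
      show ("\"" : String).toList = ['"'] from by decide,
      show ("'" : String).toList = ['\''] from by decide]
  simp only [replace_single]
  exact escape_chain s.toList

-- ===== VERDICT (by name: the statement is the Claim_ definition above) =====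
theorem text2Html_spec : Claim_equal_text2Html := by
  intro content _
  unfold Spec_text2Html
  rw [← String.toList_inj]
  -- B at the list level: prefix ++ one flatMap pass ++ suffix
  have hB : (text2Html_alt content).toList
      = "<p>".toList ++ content.toList.flatMap escB ++ "</p><br>".toList := by
    unfold text2Html_alt
    rw [String.toList_ofList, PySem.List.foldl_append_eq_flatMap]
    simp only [escB_eq]
  -- the split of A's escaped text
  have hsc : PySem.Chars.split? (escapeA content).toList ['\n']
      = some (splitNL (escapeA content).toList) := by
    simp [PySem.Chars.split?, splitOn_nl]
  obtain ⟨ls, hls, hmap⟩ :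
      ∃ ls, PySem.Str.split? (escapeA content) "\n" = some ls ∧
        ls.map String.toList = splitNL (escapeA content).toList := by
    have h := PySem.Str.split?_map (escapeA content) "\n"
    rw [show ("\n" : String).toList = ['\n'] from by decide, hsc] at h
    cases hx : PySem.Str.split? (escapeA content) "\n" with
    | none => rw [hx] at h; simp at h
    | some ls =>
        rw [hx] at h
        exact ⟨ls, rfl, by simpa using h⟩
  -- A at the list level
  have hA : (text2Html content).toList
      = "<p>".toList ++ content.toList.flatMap escB ++ "</p><br>".toList := by
    simp only [text2Html, hls, Option.getD_some]
    rw [PySem.Str.toList_join,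
        show ("" : String).toList = ([] : List Char) from by decide, join_nil_sep]
    rw [List.map_map,
        show (String.toList ∘ fun line => "<p>" ++ line ++ "</p><br>")
          = ((fun l => "<p>".toList ++ l ++ "</p><br>".toList) ∘ String.toList) from by
            funext l; simp,
        ← List.map_map, hmap]
    have h0 : List.modifyHead (fun x => ([] : List Char) ++ x) (splitNL (escapeA content).toList)
        = splitNL (escapeA content).toList := by
      cases splitNL (escapeA content).toList <;> simp
    have hw := wrap_flatten_aux "<p>".toList "</p><br>".toList (escapeA content).toList []
    rw [h0] at hw
    rw [hw, escapeA_toList]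
    rw [List.flatMap_assoc]
    simp only [escFull_then_nl]
    simp
  rw [hA, hB]
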